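-- pv_equiv track=rewrite | github.com/dmendelsohn/advent_of_code | python/src/year2015/day14/advent14.py | getFarthestDistance
-- ===== SOURCE A (Python) =====
-- def getDistanceTraveled(speed, flyTime, restTime, timeElapsed):
-- 	cycles = int(timeElapsed/(flyTime+restTime))
-- 	distance = speed*flyTime*cycles
-- 	leftOverTime = timeElapsed - cycles*(flyTime+restTime)
-- 	distance += speed*min(flyTime, leftOverTime)
-- 	return distance
--
-- def getFarthestDistance(reindeer, numSeconds):
-- 	distances = []
-- 	for r in reindeer:
-- 		dist = getDistanceTraveled(r[1], r[2], r[3], numSeconds)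
-- 		distances.append(dist)
-- 	longest = max(distances)
-- 	winners = []
-- 	for i in range(len(reindeer)):
-- 		if distances[i] == longest:
-- 			winners.append(reindeer[i][0])
-- 	return longest, winners
-- ===== SOURCE B (Python) =====
-- def getDistanceTraveled(speed, flyTime, restTime, timeElapsed):
-- 	cycles = int(timeElapsed/(flyTime+restTime))
-- 	distance = speed*flyTime*cycles
-- 	leftOverTime = timeElapsed - cycles*(flyTime+restTime)
-- 	distance += speed*min(flyTime, leftOverTime)
-- 	return distance
--
-- def getFarthestDistance(reindeer, numSeconds):
-- 	longest = None
-- 	winners = []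
-- 	for r in reindeer:
-- 		dist = getDistanceTraveled(r[1], r[2], r[3], numSeconds)
-- 		if longest is None or dist > longest:
-- 			longest = dist
-- 			winners = [r[0]]
-- 		elif dist == longest:
-- 			winners.append(r[0])
-- 	return longest, winners
-- ===== Notes on version B (the rewrite author's own statement) =====
-- stated objective: simpler
-- what changed: Replaces A's three passes (build a distances list, max() over it, then an index loop re-scanning distances to collect winners) with a single loop over the reindeer maintaining the current longest distance and the winners list; no intermediate distances list and no indexing. Pre_ excludes the empty list, where A raises ValueError from max([]) while B returns (None, []), and any reindeer with flyTime+restTime == 0, where both raise ZeroDivisionError.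
-- outside the precondition, e.g. on getFarthestDistance([], 10): A raises ValueError, B returns (None, [])
import Mathlib
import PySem

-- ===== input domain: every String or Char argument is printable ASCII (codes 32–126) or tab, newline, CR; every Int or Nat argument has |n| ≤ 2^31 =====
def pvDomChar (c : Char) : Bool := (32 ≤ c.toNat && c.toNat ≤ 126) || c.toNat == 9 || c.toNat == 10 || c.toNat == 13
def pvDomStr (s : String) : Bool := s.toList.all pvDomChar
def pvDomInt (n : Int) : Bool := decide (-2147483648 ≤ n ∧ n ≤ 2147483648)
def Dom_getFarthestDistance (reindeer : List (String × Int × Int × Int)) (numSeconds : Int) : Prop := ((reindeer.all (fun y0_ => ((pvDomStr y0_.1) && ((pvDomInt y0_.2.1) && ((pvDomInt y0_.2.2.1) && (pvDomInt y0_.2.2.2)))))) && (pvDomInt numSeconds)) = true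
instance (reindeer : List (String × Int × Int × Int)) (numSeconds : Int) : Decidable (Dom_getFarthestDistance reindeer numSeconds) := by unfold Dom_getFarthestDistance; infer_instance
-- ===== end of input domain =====

-- B replaces A's three passes (distances list, max(), index loop over distances) with a single
-- loop maintaining the current longest distance and the winners list (simpler decomposition);
-- Pre_ excludes the inputs on which A raises.


-- ===== PORT A =====
-- int(timeElapsed/(flyTime+restTime)) is float division then truncation toward zero; on Dom
-- (|ints| ≤ 2^31) this equals exact truncating division, PySem.Int.truncdiv.
def getDistanceTraveled (speed flyTime restTime timeElapsed : Int) : Int :=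
  let cycles := PySem.Int.truncdiv timeElapsed (flyTime + restTime)
  let distance := speed * flyTime * cycles
  let leftOverTime := timeElapsed - cycles * (flyTime + restTime)
  distance + speed * min flyTime leftOverTime

def getFarthestDistance (reindeer : List (String × Int × Int × Int)) (numSeconds : Int) : Int × List String :=
  let distances := reindeer.foldl
    (fun acc r => acc ++ [getDistanceTraveled r.2.1 r.2.2.1 r.2.2.2 numSeconds]) []
  -- max(distances): ValueError on an empty list, excluded by Pre_; .getD 0 is never the result there
  let longest := (PySem.List.max? distances (fun x => x)).getD 0
  let winners := (PySem.List.pyRange 0 (PySem.List.len reindeer)).foldl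
    (fun w i =>
      if PySem.List.pyGetD distances i 0 = longest
      then w ++ [(PySem.List.pyGetD reindeer i ("", 0, 0, 0)).1]
      else w) []
  (longest, winners)

-- ===== PORT B =====
-- one step of B's single loop: update (current longest (None before the first reindeer), winners)
def altStep (numSeconds : Int) (st : Option Int × List String) (r : String × Int × Int × Int) :
    Option Int × List String :=
  let dist := getDistanceTraveled r.2.1 r.2.2.1 r.2.2.2 numSeconds
  match st.1 with
  | none => (some dist, [r.1])
  | some l =>
    if dist > l then (some dist, [r.1])
    else if dist = l then (some l, st.2 ++ [r.1])
    else st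

def getFarthestDistance_alt (reindeer : List (String × Int × Int × Int)) (numSeconds : Int) : Int × List String :=
  -- Source B's longest is None only on the empty list, which Pre_ excludes
  let res := reindeer.foldl (altStep numSeconds) (none, [])
  (res.1.getD 0, res.2)

-- ===== PRECONDITION & SPEC =====
-- Pre_ excludes exactly the inputs where Python A raises: the empty list (max([]) is ValueError)
-- and any reindeer with flyTime+restTime = 0 (ZeroDivisionError).
def Pre_getFarthestDistance (reindeer : List (String × Int × Int × Int)) (numSeconds : Int) : Prop :=
  reindeer.isEmpty = false ∧ reindeer.all (fun r => r.2.2.1 + r.2.2.2 != 0) = true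
instance (reindeer : List (String × Int × Int × Int)) (numSeconds : Int) : Decidable (Pre_getFarthestDistance reindeer numSeconds) := by unfold Pre_getFarthestDistance; infer_instance
def pvWitness_getFarthestDistance : (List (String × Int × Int × Int)) × Int :=
  ([("Comet", 14, 10, 127), ("Dancer", 16, 11, 162)], 1000)

def Spec_getFarthestDistance (reindeer : List (String × Int × Int × Int)) (numSeconds : Int) (out : Int × List String) : Prop := out = getFarthestDistance_alt reindeer numSeconds
instance (reindeer : List (String × Int × Int × Int)) (numSeconds : Int) (out : Int × List String) : Decidable (Spec_getFarthestDistance reindeer numSeconds out) := by unfold Spec_getFarthestDistance; infer_instance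

-- ===== CLAIM (what is proved, stated in full; the proofs are below) =====
def Claim_equal_getFarthestDistance : Prop := ∀ (reindeer : List (String × Int × Int × Int)) (numSeconds : Int), Dom_getFarthestDistance reindeer numSeconds → Pre_getFarthestDistance reindeer numSeconds → Spec_getFarthestDistance reindeer numSeconds (getFarthestDistance reindeer numSeconds)

-- ===== LEMMAS AND PROOFS =====

-- the distance computed for one reindeer tuple
def dA (numSeconds : Int) (r : String × Int × Int × Int) : Int :=
  getDistanceTraveled r.2.1 r.2.2.1 r.2.2.2 numSeconds

lemma altStep_none (nS : Int) (w : List String) (r : String × Int × Int × Int) :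
    altStep nS (none, w) r = (some (dA nS r), [r.1]) := rfl

lemma altStep_some (nS l : Int) (w : List String) (r : String × Int × Int × Int) :
    altStep nS (some l, w) r =
      (if dA nS r > l then (some (dA nS r), [r.1])
       else if dA nS r = l then (some l, w ++ [r.1])
       else (some l, w)) := by
  simp only [altStep, dA, getDistanceTraveled]
  rfl

-- max() over a nonempty Int list is the running maximum of its tail from its head
lemma max?_cons_getD (m : Int) (ds : List Int) :
    (PySem.List.max? (m :: ds) (fun x : Int => x)).getD 0 = ds.foldl max m := by
  induction ds generalizing m with
  | nil => rfl
  | cons x xs ih =>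
    have h1 : PySem.List.max? (m :: x :: xs) (fun x : Int => x)
        = PySem.List.max? (max m x :: xs) (fun x : Int => x) := by
      simp only [PySem.List.max?, List.foldl_cons]
      by_cases h : m < x
      · simp [h, max_eq_right h.le]
      · simp [h, max_eq_left (not_lt.mp h)]
    rw [h1, ih, List.foldl_cons]

-- A's winners loop (index loop over range, reading distances[i] and reindeer[i][0])
-- collects exactly the names of the reindeer whose distance equals L, in order
lemma winnersA_eq (nS L : Int) (rs : List (String × Int × Int × Int)) (acc : List String) :
    (List.range rs.length).foldl
      (fun w i =>
        if (rs.map (dA nS)).getD i 0 = L then w ++ [(rs.getD i ("", 0, 0, 0)).1] else w) acc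
    = acc ++ (rs.filter (fun r => dA nS r = L)).map Prod.fst := by
  induction rs generalizing acc with
  | nil => simp
  | cons r rs ih =>
    simp only [List.length_cons, List.range_succ_eq_map, List.foldl_cons, List.foldl_map,
      List.map_cons, List.getD_cons_zero, List.getD_cons_succ]
    by_cases h : dA nS r = L
    · rw [if_pos h, ih]
      simp [h]
    · rw [if_neg h, ih]
      simp [h]

-- B's loop invariant: folding from state (some l, w) yields the running max and,
-- if that max is still l, w extended by the names matching it, else exactly the matching names
lemma foldB_inv (nS : Int) (rs : List (String × Int × Int × Int)) (l : Int) (w : List String) :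
    rs.foldl (altStep nS) (some l, w) =
      (some (rs.foldl (fun m r => max m (dA nS r)) l),
       (if rs.foldl (fun m r => max m (dA nS r)) l = l then w else []) ++
         (rs.filter (fun r => dA nS r = rs.foldl (fun m r => max m (dA nS r)) l)).map Prod.fst) := by
  induction rs generalizing l w with
  | nil => simp
  | cons r rs ih =>
    have hle : ∀ (a : Int) (t : List (String × Int × Int × Int)),
        a ≤ t.foldl (fun m x => max m (dA nS x)) a := by
      intro a t
      rw [← List.foldl_map (f := dA nS) (g := max)]
      exact (PySem.List.le_foldl_max (t.map (dA nS)) a).1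
    simp only [List.foldl_cons, altStep_some]
    rcases lt_trichotomy (dA nS r) l with hlt | heq | hgt
    · -- dist < l : state unchanged
      rw [if_neg (not_lt.mpr hlt.le), if_neg hlt.ne, ih]
      have hmax : max l (dA nS r) = l := max_eq_left hlt.le
      have hLge : l ≤ rs.foldl (fun m x => max m (dA nS x)) l := hle l rs
      have hne : ¬ (dA nS r = rs.foldl (fun m x => max m (dA nS x)) l) := by
        intro h; exact absurd (h ▸ lt_of_lt_of_le hlt hLge) (lt_irrefl _)
      simp [hmax, hne]
    · -- dist = l : append the name
      rw [if_neg (by omega), if_pos heq, ih]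
      have hmax : max l (dA nS r) = l := by simp [heq]
      simp only [List.filter_cons, heq]
      by_cases hL : rs.foldl (fun m x => max m (dA nS x)) l = l
      · simp [hL]
      · have hL' : ¬ (l = rs.foldl (fun m x => max m (dA nS x)) l) := fun h => hL h.symm
        simp [hL, hL']
    · -- dist > l : reset
      rw [if_pos hgt, ih]
      have hmax : max l (dA nS r) = dA nS r := max_eq_right hgt.le
      have hLge : dA nS r ≤ rs.foldl (fun m x => max m (dA nS x)) (dA nS r) := hle _ rs
      have hLne : ¬ (rs.foldl (fun m x => max m (dA nS x)) (dA nS r) = l) := by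
        intro h; exact absurd (lt_of_lt_of_le hgt (h ▸ hLge)) (lt_irrefl _)
      simp only [hmax, hLne, if_false, List.filter_cons]
      by_cases hr : dA nS r = rs.foldl (fun m x => max m (dA nS x)) (dA nS r)
      · simp [← hr]
      · have hr' : ¬ (rs.foldl (fun m x => max m (dA nS x)) (dA nS r) = dA nS r) :=
          fun h => hr h.symm
        simp [hr, hr']

-- ===== VERDICT (by name: the statement is the Claim_ definition above) =====
theorem getFarthestDistance_spec : Claim_equal_getFarthestDistance := by
  intro reindeer numSeconds _hdom hpre
  unfold Spec_getFarthestDistance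
  obtain ⟨hne, -⟩ := hpre
  rcases reindeer with _ | ⟨r, rs⟩
  · exact absurd hne (by simp)
  unfold getFarthestDistance getFarthestDistance_alt
  simp only [PySem.List.foldl_append_singleton_eq_map, List.nil_append]
  have hdists : (r :: rs).map (fun x => getDistanceTraveled x.2.1 x.2.2.1 x.2.2.2 numSeconds)
      = (r :: rs).map (dA numSeconds) := rfl
  rw [hdists]
  -- A's longest is the running max of the distances
  have hmax : (PySem.List.max? ((r :: rs).map (dA numSeconds)) (fun x => x)).getD 0
      = rs.foldl (fun m x => max m (dA numSeconds x)) (dA numSeconds r) := by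
    rw [List.map_cons, max?_cons_getD, ← List.foldl_map (f := dA numSeconds) (g := max)]
  rw [hmax]
  -- A's winners loop over pyRange with pyGetD becomes the Nat-range loop
  rw [PySem.List.len, PySem.List.pyRange_zero_natCast, List.foldl_map]
  simp only [PySem.List.pyGetD_natCast]
  rw [winnersA_eq numSeconds _ (r :: rs) []]
  -- B's side: first step initialises the state, then the loop invariant
  rw [List.foldl_cons, altStep_none, foldB_inv]
  simp only [Option.getD_some, List.nil_append, Prod.mk.injEq]
  refine ⟨trivial, ?_⟩
  by_cases h : dA numSeconds r = rs.foldl (fun m x => max m (dA numSeconds x)) (dA numSeconds r)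
  · simp [← h]
  · have h' : ¬ (rs.foldl (fun m x => max m (dA numSeconds x)) (dA numSeconds r)
        = dA numSeconds r) := fun hh => h hh.symm
    simp [h, h']
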